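-- pv_equiv track=rewrite | github.com/msaribekyan/Escape-The-Room | Room 5/Coding/CodeWizards.py | for_list
-- ===== SOURCE A (Python) =====
-- def for_list(input_list):
--     if not isinstance(input_list, list) or not input_list:
--         raise ValueError("Input must be a non-empty list")
--     result_list=[]
--     for index, value in enumerate(input_list):
--         if index%2==0:
--             result_list.append((value,index))
--     return result_list
-- ===== SOURCE B (Python) =====
-- def for_list(input_list):
--     if not isinstance(input_list, list) or not input_list:
--         raise ValueError("Input must be a non-empty list")
--     result = []
--     i = 0
--     n = len(input_list)
--     while i < n:
--         result.append((input_list[i], i))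
--         i += 2
--     return result
-- ===== Notes on version B (the rewrite author's own statement) =====
-- stated objective: alternative
-- what changed: Replaces the loop over enumerate(input_list) with a parity test on every index by a while loop that strides the index two at a time, so only even positions are ever visited and no modulo branch exists.
import Mathlib
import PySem

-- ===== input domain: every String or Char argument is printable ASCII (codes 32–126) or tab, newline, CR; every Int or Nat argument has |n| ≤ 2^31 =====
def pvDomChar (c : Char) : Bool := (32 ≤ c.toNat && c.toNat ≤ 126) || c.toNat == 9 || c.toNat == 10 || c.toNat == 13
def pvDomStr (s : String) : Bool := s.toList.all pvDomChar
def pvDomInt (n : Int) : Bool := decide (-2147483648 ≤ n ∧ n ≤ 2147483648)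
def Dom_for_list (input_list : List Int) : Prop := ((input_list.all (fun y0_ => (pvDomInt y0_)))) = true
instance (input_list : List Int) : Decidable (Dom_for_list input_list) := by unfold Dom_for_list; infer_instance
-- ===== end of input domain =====

-- B replaces A's enumerate-with-modulo-filter loop by a while loop that strides the
-- index two at a time, visiting only even positions; same output, same cost.


-- ===== PORT A =====
-- A: empty list raises ValueError (excluded by Pre_); otherwise loop over
-- enumerate(input_list), appending (value, index) when index % 2 == 0.
def for_list (input_list : List Int) : List (Int × Int) :=
  (PySem.List.enumerate input_list 0).foldl
    (fun result_list p =>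
      if PySem.Int.mod p.1 2 == 0 then result_list ++ [(p.2, p.1)] else result_list)
    []

-- ===== PORT B =====
-- B's while loop: 'while i < n: result.append((input_list[i], i)); i += 2'.
-- input_list[i] is ported as pyGetD (exact here: the loop only reads 0 ≤ i < n).
def for_list_loop (xs : List Int) (n : Int) (i : Int) (result : List (Int × Int)) :
    List (Int × Int) :=
  if i < n then
    for_list_loop xs n (i + 2) (result ++ [(PySem.List.pyGetD xs i 0, i)])
  else result
termination_by (n - i).toNat
decreasing_by omega

def for_list_alt (input_list : List Int) : List (Int × Int) :=
  for_list_loop input_list (input_list.length : Int) 0 []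

-- ===== PRECONDITION & SPEC =====
-- A raises ValueError on the empty list; B keeps the same guard and raises there too.
def Pre_for_list (input_list : List Int) : Prop := input_list ≠ []
instance (input_list : List Int) : Decidable (Pre_for_list input_list) := by
  unfold Pre_for_list; infer_instance
def pvWitness_for_list : List Int := [3, 1, 4]

def Spec_for_list (input_list : List Int) (out : List (Int × Int)) : Prop := out = for_list_alt input_list
instance (input_list : List Int) (out : List (Int × Int)) : Decidable (Spec_for_list input_list out) := by unfold Spec_for_list; infer_instance

-- ===== CLAIM (what is proved, stated in full; the proofs are below) =====
def Claim_equal_for_list : Prop := ∀ (input_list : List Int), Dom_for_list input_list → Pre_for_list input_list → Spec_for_list input_list (for_list input_list)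

-- ===== LEMMAS AND PROOFS =====

-- reference function: even-position elements of xs paired with i, i+2, i+4, …
def gStride (xs : List Int) (i : Int) : List (Int × Int) :=
  match xs with
  | [] => []
  | x :: rest => (x, i) :: gStride (rest.drop 1) (i + 2)
termination_by xs.length

theorem mod_two_even (n : Nat) : PySem.Int.mod (2 * (n : Int)) 2 == 0 := by
  simp [PySem.Int.mod]

theorem mod_two_odd (n : Nat) : ¬ (PySem.Int.mod (2 * (n : Int) + 1) 2 == 0) := by
  simp [PySem.Int.mod]

theorem filter_enumerate_eq_gStride (xs : List Int) (n : Nat) :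
    ((PySem.List.enumerate xs (2 * (n : Int))).filter
        (fun p => PySem.Int.mod p.1 2 == 0)).map (fun p => (p.2, p.1))
      = gStride xs (2 * (n : Int)) := by
  match xs with
  | [] => simp [gStride]
  | [x] =>
    simp [PySem.List.enumerate_cons, PySem.List.enumerate_nil, List.filter,
      gStride]
  | x :: y :: rest =>
    have h1 : (2 : Int) * n + 1 + 1 = 2 * ((n + 1 : Nat) : Int) := by push_cast; ring
    have h2 : (2 : Int) * n + 2 = 2 * ((n + 1 : Nat) : Int) := by push_cast; ring
    rw [PySem.List.enumerate_cons, PySem.List.enumerate_cons, h1]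
    simp only [List.filter, mod_two_even n, mod_two_odd n, List.map]
    rw [filter_enumerate_eq_gStride rest (n + 1)]
    simp [gStride, h2]
termination_by xs.length

theorem for_list_eq_gStride (xs : List Int) : for_list xs = gStride xs 0 := by
  unfold for_list
  rw [PySem.List.foldl_append_if]
  simpa using filter_enumerate_eq_gStride xs 0

theorem loop_eq_gStride (xs : List Int) (k : Nat) (res : List (Int × Int)) :
    for_list_loop xs (xs.length : Int) (k : Int) res = res ++ gStride (xs.drop k) (k : Int) := by
  rw [for_list_loop]
  by_cases h : (k : Int) < (xs.length : Int)
  · have hk : k < xs.length := by exact_mod_cast h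
    have hdrop : xs.drop k = xs[k] :: xs.drop (k + 1) := List.drop_eq_getElem_cons hk
    have hget : PySem.List.pyGetD xs (k : Int) 0 = xs[k] := by
      simp [PySem.List.pyGetD_natCast, List.getD_eq_getElem?_getD, hk]
    have hrec := loop_eq_gStride xs (k + 2) (res ++ [(PySem.List.pyGetD xs (k : Int) 0, (k : Int))])
    have hcast : ((k : Int) + 2) = ((k + 2 : Nat) : Int) := by push_cast; ring
    have hg : gStride (xs[k] :: xs.drop (k + 1)) (k : Int)
        = (xs[k], (k : Int)) :: gStride (xs.drop (k + 2)) ((k : Int) + 2) := by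
      rw [gStride]
      rw [List.drop_drop]
    rw [if_pos h, hcast, hrec, hdrop, hg, hcast]
    simp [hget]
  · rw [if_neg h]
    have : xs.drop k = [] := List.drop_eq_nil_of_le (by exact_mod_cast not_lt.mp h)
    rw [this]
    simp [gStride]
termination_by xs.length - k
decreasing_by omega

-- ===== VERDICT (by name: the statement is the Claim_ definition above) =====
theorem for_list_spec : Claim_equal_for_list := by
  intro xs _ _
  unfold Spec_for_list for_list_alt
  have := loop_eq_gStride xs 0 []
  simpa [for_list_eq_gStride] using this.symm
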